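-- pv_equiv track=rewrite | github.com/francistianlal/codability_challenge | MaxPathFromTheLeftTopCorner.py | solution
-- ===== SOURCE A (Python) =====
-- def retrive_B(A_size,Pixel):
--     i = Pixel[0]
--     j = Pixel[1]
--     if i == A_size[0]:
--         return False
--     else:
--         i += 1
--     Pixel_new=[i,j]
--     return Pixel_new
--
-- def retrive_R(A_size,Pixel):
--     i = Pixel[0]
--     j = Pixel[1]
--     if j == A_size[1]:
--         return False
--     else:
--         j += 1
--     Pixel_new=[i,j]
--     return Pixel_new
--
-- def solution(A):
--     A_size = [len(A)-1,len(A[0])-1]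
--     i = j = 0
--     number = str(A[i][j])
--     Pixel_sto = [[i,j]]
--     value_sto = 0
--     Pixel_sto_before = [[i,j]]
--     while number[-1] != '0' :
--         for index in range(len(Pixel_sto_before)):
--             Pixel = Pixel_sto_before[index]
--             P_new_bottom = retrive_B(A_size, Pixel)
--             if P_new_bottom != False:
--                 if len(Pixel_sto) == 0:
--                     Pixel_sto.append(P_new_bottom)
--                     value_sto = (A[P_new_bottom[0]][P_new_bottom[1]])
--                 else:
--                     if A[P_new_bottom[0]][P_new_bottom[1]] == value_sto:
--                         Pixel_sto.append(P_new_bottom)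
--                     elif A[P_new_bottom[0]][P_new_bottom[1]] > (value_sto):
--                         value_sto = A[P_new_bottom[0]][P_new_bottom[1]]
--                         Pixel_sto = [P_new_bottom]
--
--             P_new_right = retrive_R(A_size, Pixel)
--             if P_new_right != False:
--                 P_new_right = retrive_R(A_size,Pixel)
--                 if len(Pixel_sto) == 0:
--                     Pixel_sto.append(P_new_right)
--                     value_sto = (A[P_new_right[0]][P_new_right[1]])
--                 else:
--                     if A[P_new_right[0]][P_new_right[1]] == (value_sto):
--                        Pixel_sto.append(P_new_right)
--                     elif A[P_new_right[0]][P_new_right[1]] > (value_sto):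
--                            Pixel_sto = [P_new_right]
--                            value_sto = A[P_new_right[0]][P_new_right[1]]
--
--         number += str(value_sto)
--         Pixel_sto_before = Pixel_sto
--         Pixel_sto = []
--         value_sto = 0
--
--     number = number[:-1]
--     return number
-- ===== SOURCE B (Python) =====
-- def solution(A):
--     # Level-by-level dynamic programming over anti-diagonals: a boolean mask over
--     # rows marks which cells of the current diagonal carry the running maximum.
--     m, n = len(A), len(A[0])
--     number = str(A[0][0])
--     front = [i == 0 for i in range(m)]  # front[i]: cell (i, k-i) is on the best frontier
--     k = 0
--     while number[-1] != '0':
--         k += 1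
--         reach = [(front[i] or (i > 0 and front[i - 1])) and 0 <= k - i < n
--                  for i in range(m)]
--         vals = [A[i][k - i] for i in range(m) if reach[i]]
--         v = max(vals) if vals else 0
--         number += str(v)
--         front = [reach[i] and A[i][k - i] == v for i in range(m)]
--     return number[:-1]
-- ===== Notes on version B (the rewrite author's own statement) =====
-- stated objective: alternative
-- what changed: B replaces A's list of argmax pixel pairs (appended with duplicates, one per parent, so it can grow exponentially on ties) by a per-anti-diagonal dynamic program over a boolean row mask, indexing cells as (i, k-i); Pre_ excludes empty/ragged-short grids (A raises IndexError, or returns early without reaching the missing cell) and grids whose existing start neighbours are all negative, an unspecified corner outside the task's nonnegative-pixel domain on which A stops the walk at once while B continues.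
-- outside the precondition, e.g. on solution([[0, 5], [7]]): A returns '', B returns ''; on solution([[1, -1]]): A returns '1', B returns '1-1'; on solution([[5], [-8499], [2], []]): A returns '5', B raises IndexError
import Mathlib
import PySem

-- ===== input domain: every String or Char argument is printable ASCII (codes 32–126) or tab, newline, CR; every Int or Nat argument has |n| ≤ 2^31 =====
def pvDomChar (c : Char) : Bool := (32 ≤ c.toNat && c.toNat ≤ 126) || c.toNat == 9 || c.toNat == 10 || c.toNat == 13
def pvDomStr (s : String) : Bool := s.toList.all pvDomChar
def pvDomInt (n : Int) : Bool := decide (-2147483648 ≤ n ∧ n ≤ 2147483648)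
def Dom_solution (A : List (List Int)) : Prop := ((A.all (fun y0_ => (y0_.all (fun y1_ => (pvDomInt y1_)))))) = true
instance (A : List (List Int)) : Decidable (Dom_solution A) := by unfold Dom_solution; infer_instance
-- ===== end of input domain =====

-- B replaces A's list of argmax pixel pairs (with duplicates, one per parent) by a per-anti-diagonal
-- dynamic program over a boolean row mask; return value only (neither program mutates its argument).

-- ===== PORT A =====
def retrive_B (Asize : Int × Int) (Pixel : Int × Int) : Option (Int × Int) :=
  -- Python returns False (here: none) or the new pixel
  if Pixel.1 = Asize.1 then none else some (Pixel.1 + 1, Pixel.2)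

def retrive_R (Asize : Int × Int) (Pixel : Int × Int) : Option (Int × Int) :=
  if Pixel.2 = Asize.2 then none else some (Pixel.1, Pixel.2 + 1)

-- A[i][j]; exact for the nonnegative in-range indices both programs use under Pre_solution
def cellA (A : List (List Int)) (i j : Int) : Int :=
  PySem.List.pyGetD (PySem.List.pyGetD A i []) j 0

-- A's repeated candidate block against the running (Pixel_sto, value_sto) state
def stepCand (A : List (List Int)) (st : List (Int × Int) × Int) (P : Int × Int) :
    List (Int × Int) × Int :=
  let v := cellA A P.1 P.2
  if st.1.length = 0 then (st.1 ++ [P], v)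
  else if v = st.2 then (st.1 ++ [P], st.2)
  else if v > st.2 then ([P], v)
  else st

-- one iteration of A's inner for-loop: try the bottom move, then the right move
def processPixel (A : List (List Int)) (Asize : Int × Int)
    (st : List (Int × Int) × Int) (Pixel : Int × Int) : List (Int × Int) × Int :=
  let st1 := match retrive_B Asize Pixel with
    | none => st
    | some P => stepCand A st P
  match retrive_R Asize Pixel with
  | none => st1
  | some P => stepCand A st1 P

-- the while loop, on fuel m+n+2 (each level moves one step down/right, so it suffices)
def loopA (A : List (List Int)) (Asize : Int × Int) :
    Nat → String → List (Int × Int) → List (Int × Int) → Int → String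
  | 0, number, _, _, _ => number
  | Nat.succ fuel, number, before, sto, val =>
    if PySem.Str.pyGet? number (-1) ≠ some '0' then
      let r := before.foldl (processPixel A Asize) (sto, val)
      loopA A Asize fuel (number ++ PySem.Int.toStr r.2) r.1 [] 0
    else number

def solution (A : List (List Int)) : String :=
  let Asize : Int × Int :=
    ((A.length : Int) - 1, ((PySem.List.pyGetD A 0 ([] : List Int)).length : Int) - 1)
  let number := PySem.Int.toStr (cellA A 0 0)
  let res := loopA A Asize (A.length + (PySem.List.pyGetD A 0 ([] : List Int)).length + 2)
    number [(0, 0)] [(0, 0)] 0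
  PySem.Str.slice res none (some (-1))   -- number[:-1]

-- ===== PORT B =====
-- reach: which rows of diagonal k' have a frontier parent and land inside the grid
def reachList (A : List (List Int)) (n : Int) (k' : Int) (front : List Bool) : List Bool :=
  (List.range A.length).map (fun i =>
    (front.getD i false || (decide (0 < i) && front.getD (i - 1) false))
    && decide (0 ≤ k' - (i : Int) ∧ k' - (i : Int) < n))

-- the values on diagonal k' at the reachable rows
def valsB (A : List (List Int)) (n : Int) (k' : Int) (front : List Bool) : List Int :=
  ((List.range A.length).filter (fun i => (reachList A n k' front).getD i false)).map
    (fun (i : Nat) => cellA A (i : Int) (k' - (i : Int)))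

-- v = max(vals) if vals else 0
def bestV (A : List (List Int)) (n : Int) (k' : Int) (front : List Bool) : Int :=
  match PySem.List.max? (valsB A n k' front) (fun x => x) with
  | some w => w
  | none => 0

-- the next mask: reachable rows holding the level maximum
def frontNext (A : List (List Int)) (n : Int) (k' : Int) (front : List Bool) : List Bool :=
  (List.range A.length).map (fun i =>
    (reachList A n k' front).getD i false
    && decide (cellA A (i : Int) (k' - (i : Int)) = bestV A n k' front))

-- B's while loop over diagonals k, with the row mask as state
def loopB (A : List (List Int)) (n : Int) : Nat → String → Int → List Bool → String
  | 0, number, _, _ => number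
  | Nat.succ fuel, number, k, front =>
    if PySem.Str.pyGet? number (-1) ≠ some '0' then
      loopB A n fuel (number ++ PySem.Int.toStr (bestV A n (k + 1) front)) (k + 1)
        (frontNext A n (k + 1) front)
    else number

def solution_alt (A : List (List Int)) : String :=
  let n : Int := ((PySem.List.pyGetD A 0 ([] : List Int)).length : Int)
  let number := PySem.Int.toStr (cellA A 0 0)
  let res := loopB A n (A.length + (PySem.List.pyGetD A 0 ([] : List Int)).length + 2)
    number 0 ((List.range A.length).map (fun i => decide (i = 0)))
  PySem.Str.slice res none (some (-1))

-- ===== PRECONDITION & SPEC =====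
-- Start cells whose existing right/down neighbours are all negative (start value not ending in the
-- digit 0): a corner outside this pixel-grid task's natural nonnegative domain, on which A stops the
-- walk at once (its seed value 0 wins the first level) while B continues with the true negative
-- maximum — both defensible, neither specified, so these grids are excluded from the claim.
def NegStart (A : List (List Int)) : Prop :=
  (A.headD []).headD 0 % 10 ≠ 0 ∧
  ((A.length = 1 ∧ 2 ≤ (A.headD []).length ∧ (A.headD []).getD 1 0 < 0) ∨
   (2 ≤ A.length ∧ (A.headD []).length = 1 ∧ (A.getD 1 []).getD 0 0 < 0) ∨
   (2 ≤ A.length ∧ 2 ≤ (A.headD []).length ∧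
     (A.getD 1 []).getD 0 0 < 0 ∧ (A.headD []).getD 1 0 < 0))

-- Pre_ excludes (a) grids on which A raises IndexError — the empty grid, an empty first row, and
-- ragged grids with a row shorter than row 0 (on a few of those the missing cell happens to be
-- unreached and A still returns — excluded all the same as a shape artefact of A's frontier path);
-- and (b) the NegStart corner above, where A and B defensibly return different values.
def Pre_solution (A : List (List Int)) : Prop :=
  A ≠ [] ∧ 0 < (A.headD []).length ∧ (∀ r ∈ A, (A.headD []).length ≤ r.length) ∧
  ¬ NegStart A
instance (A : List (List Int)) : Decidable (Pre_solution A) := by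
  unfold Pre_solution NegStart; infer_instance

def pvWitness_solution : List (List Int) := [[1, 2], [3, 0]]

def Spec_solution (A : List (List Int)) (out : String) : Prop := out = solution_alt A
instance (A : List (List Int)) (out : String) : Decidable (Spec_solution A out) := by
  unfold Spec_solution; infer_instance

-- ===== CLAIM (what is proved, stated in full; the proofs are below) =====
def Claim_equal_solution : Prop :=
  ∀ (A : List (List Int)), Dom_solution A → Pre_solution A → Spec_solution A (solution A)

-- ===== LEMMAS AND PROOFS =====

-- value of a pixel
def cellP (A : List (List Int)) (p : Int × Int) : Int := cellA A p.1 p.2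

-- the flattened candidate stream A's inner for-loop feeds to stepCand
def candList (Asize : Int × Int) (before : List (Int × Int)) : List (Int × Int) :=
  before.flatMap (fun P => (retrive_B Asize P).toList ++ (retrive_R Asize P).toList)

-- running max of pixel values, seeded with M0
def runMax (A : List (List Int)) (M0 : Int) (C : List (Int × Int)) : Int :=
  C.foldl (fun acc c => max acc (cellP A c)) M0

theorem foldl_processPixel (A : List (List Int)) (Asize : Int × Int)
    (before : List (Int × Int)) (st : List (Int × Int) × Int) :
    before.foldl (processPixel A Asize) st = (candList Asize before).foldl (stepCand A) st := by
  induction before generalizing st with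
  | nil => rfl
  | cons P rest ih =>
    simp only [List.foldl_cons, candList, List.flatMap_cons, List.foldl_append] at *
    rw [ih]
    congr 1
    cases hB : retrive_B Asize P <;> cases hR : retrive_R Asize P <;>
      simp [processPixel, hB, hR]

theorem foldl_stepCand_spec (A : List (List Int)) (C : List (Int × Int)) :
    ∀ (L : List (Int × Int)) (M0 : Int), L ≠ [] →
    C.foldl (stepCand A) (L, M0) =
      (if M0 < runMax A M0 C
        then C.filter (fun c => decide (cellP A c = runMax A M0 C))
        else L ++ C.filter (fun c => decide (cellP A c = M0)),
       runMax A M0 C) := by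
  induction C with
  | nil => intro L M0 hL; simp [runMax]
  | cons c C ih =>
    intro L M0 hL
    have hlen : ¬ (L.length = 0) := by simpa [List.length_eq_zero_iff] using hL
    have hrm : runMax A M0 (c :: C) = runMax A (max M0 (cellP A c)) C := by
      simp [runMax]
    by_cases hv : cellP A c = M0
    · have hv' : cellA A c.1 c.2 = M0 := hv
      have hstep : stepCand A (L, M0) c = (L ++ [c], M0) := by
        simp [stepCand, hlen, hv']
      rw [List.foldl_cons, hstep, ih (L ++ [c]) M0 (by simp)]
      have hMeq : runMax A M0 (c :: C) = runMax A M0 C := by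
        rw [hrm, hv]; simp
      rw [hMeq]
      have hle : M0 ≤ runMax A M0 C := (PySem.List.le_foldl_max_int C (cellP A) M0).1
      by_cases hlt : M0 < runMax A M0 C
      · simp only [if_pos hlt]
        rw [List.filter_cons_of_neg (by simp [hv]; omega)]
      · simp only [if_neg hlt]
        rw [List.filter_cons_of_pos (by simp [hv]), List.append_assoc]
        rfl
    · by_cases hgt : cellP A c > M0
      · have hv' : ¬ cellA A c.1 c.2 = M0 := hv
        have hgt' : M0 < cellA A c.1 c.2 := hgt
        have hstep : stepCand A (L, M0) c = ([c], cellP A c) := by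
          simp [stepCand, hlen, hv', hgt', cellP]
        rw [List.foldl_cons, hstep, ih [c] (cellP A c) (by simp)]
        have hMeq : runMax A M0 (c :: C) = runMax A (cellP A c) C := by
          rw [hrm, max_eq_right (le_of_lt hgt)]
        rw [hMeq]
        have hle : cellP A c ≤ runMax A (cellP A c) C :=
          (PySem.List.le_foldl_max_int C (cellP A) (cellP A c)).1
        have hlt0 : M0 < runMax A (cellP A c) C := lt_of_lt_of_le hgt hle
        simp only [if_pos hlt0]
        by_cases hlt : cellP A c < runMax A (cellP A c) C
        · simp only [if_pos hlt]
          rw [List.filter_cons_of_neg (by simp; omega)]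
        · have heq : cellP A c = runMax A (cellP A c) C := le_antisymm hle (not_lt.1 hlt)
          simp only [if_neg hlt]
          rw [← heq]
          simp
      · have hv' : ¬ cellA A c.1 c.2 = M0 := hv
        have hgt' : ¬ M0 < cellA A c.1 c.2 := hgt
        have hstep : stepCand A (L, M0) c = (L, M0) := by
          simp [stepCand, hlen, hv', hgt']
        rw [List.foldl_cons, hstep, ih L M0 hL]
        have hMeq : runMax A M0 (c :: C) = runMax A M0 C := by
          rw [hrm, max_eq_left (by omega)]
        rw [hMeq]
        have hle : M0 ≤ runMax A M0 C := (PySem.List.le_foldl_max_int C (cellP A) M0).1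
        have hlt' : cellP A c < M0 := by omega
        by_cases hlt : M0 < runMax A M0 C
        · simp only [if_pos hlt]
          rw [List.filter_cons_of_neg (by simp; omega)]
        · simp only [if_neg hlt]
          rw [List.filter_cons_of_neg (by simp [hv])]

theorem foldl_stepCand_empty (A : List (List Int)) (c : Int × Int) (C : List (Int × Int)) :
    (c :: C).foldl (stepCand A) ([], (0 : Int)) =
      ((c :: C).filter (fun x => decide (cellP A x = runMax A (cellP A c) C)),
       runMax A (cellP A c) C) := by
  have hstep : stepCand A ([], (0:Int)) c = ([c], cellP A c) := by
    simp [stepCand, cellP]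
  rw [List.foldl_cons, hstep, foldl_stepCand_spec A C [c] (cellP A c) (by simp)]
  have hle : cellP A c ≤ runMax A (cellP A c) C :=
    (PySem.List.le_foldl_max_int C (cellP A) (cellP A c)).1
  by_cases hlt : cellP A c < runMax A (cellP A c) C
  · simp only [if_pos hlt]
    rw [List.filter_cons_of_neg (by simp; omega)]
  · have heq : cellP A c = runMax A (cellP A c) C := le_antisymm hle (not_lt.1 hlt)
    simp only [if_neg hlt]
    rw [← heq]
    simp

theorem loopA_stop (A : List (List Int)) (Asize : Int × Int) (fuel : Nat) (number : String)
    (b s : List (Int × Int)) (v : Int) (h : PySem.Str.pyGet? number (-1) = some '0') :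
    loopA A Asize fuel number b s v = number := by
  have h' : PySem.List.pyGet? number.toList (-1) = some '0' := by simpa using h
  cases fuel <;> simp [loopA, h']

theorem loopB_stop (A : List (List Int)) (n : Int) (fuel : Nat) (number : String)
    (k : Int) (front : List Bool)
    (h : PySem.Str.pyGet? number (-1) = some '0') :
    loopB A n fuel number k front = number := by
  have h' : PySem.List.pyGet? number.toList (-1) = some '0' := by simpa using h
  cases fuel <;> simp [loopB, h']

theorem loopA_go (A : List (List Int)) (Asize : Int × Int) (fuel : Nat) (number : String)
    (before sto : List (Int × Int)) (val : Int)
    (h : PySem.Str.pyGet? number (-1) ≠ some '0') :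
    loopA A Asize (fuel + 1) number before sto val =
      loopA A Asize fuel
        (number ++ PySem.Int.toStr (before.foldl (processPixel A Asize) (sto, val)).2)
        (before.foldl (processPixel A Asize) (sto, val)).1 [] 0 := by
  have h' : ¬ PySem.List.pyGet? number.toList (-1) = some '0' := by simpa using h
  simp [loopA, h']

theorem loopB_go (A : List (List Int)) (n : Int) (fuel : Nat) (number : String)
    (k : Int) (front : List Bool)
    (h : PySem.Str.pyGet? number (-1) ≠ some '0') :
    loopB A n (fuel + 1) number k front =
      loopB A n fuel (number ++ PySem.Int.toStr (bestV A n (k + 1) front)) (k + 1)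
        (frontNext A n (k + 1) front) := by
  have h' : ¬ PySem.List.pyGet? number.toList (-1) = some '0' := by simpa using h
  simp [loopB, h']

theorem mem_candList_iff (m n : Int) (before : List (Int × Int)) (x : Int × Int) :
    x ∈ candList (m - 1, n - 1) before ↔
      ∃ p ∈ before, (p.1 ≠ m - 1 ∧ x = (p.1 + 1, p.2)) ∨ (p.2 ≠ n - 1 ∧ x = (p.1, p.2 + 1)) := by
  simp only [candList, List.mem_flatMap, List.mem_append, Option.mem_toList,
    retrive_B, retrive_R]
  constructor
  · rintro ⟨p, hp, h | h⟩ <;> refine ⟨p, hp, ?_⟩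
    · split at h
      · simp at h
      · simp at h; exact Or.inl ⟨by assumption, h.symm⟩
    · split at h
      · simp at h
      · simp at h; exact Or.inr ⟨by assumption, h.symm⟩
  · rintro ⟨p, hp, ⟨h1, rfl⟩ | ⟨h1, rfl⟩⟩
    · exact ⟨p, hp, Or.inl (by simp [h1])⟩
    · exact ⟨p, hp, Or.inr (by simp [h1])⟩

theorem max_unique {l1 l2 : List Int} {M1 M2 : Int} (h : ∀ x, x ∈ l1 ↔ x ∈ l2)
    (h1 : M1 ∈ l1) (b1 : ∀ x ∈ l1, x ≤ M1) (h2 : M2 ∈ l2) (b2 : ∀ x ∈ l2, x ≤ M2) :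
    M1 = M2 :=
  le_antisymm (b2 _ ((h M1).1 h1)) (le_of_le_of_eq (b1 _ ((h M2).2 h2)) rfl)

theorem runMax_eq_foldl_map (A : List (List Int)) (M0 : Int) (C : List (Int × Int)) :
    runMax A M0 C = (C.map (cellP A)).foldl max M0 := by
  rw [runMax, List.foldl_map]

theorem runMax_mem (A : List (List Int)) (M0 : Int) (C : List (Int × Int)) :
    runMax A M0 C = M0 ∨ runMax A M0 C ∈ C.map (cellP A) := by
  rw [runMax_eq_foldl_map]
  simpa using PySem.List.foldl_max_mem (C.map (cellP A)) M0

theorem runMax_bounds (A : List (List Int)) (M0 : Int) (C : List (Int × Int)) :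
    M0 ≤ runMax A M0 C ∧ ∀ c ∈ C, cellP A c ≤ runMax A M0 C :=
  PySem.List.le_foldl_max_int C (cellP A) M0

theorem runMax_seed_max (A : List (List Int)) (a b : Int) (C : List (Int × Int)) :
    runMax A (max a b) C = max a (runMax A b C) := by
  induction C generalizing b with
  | nil => simp [runMax]
  | cons c C ih =>
    simp only [runMax, List.foldl_cons] at *
    rw [max_assoc, ih]

theorem getD_map_range' {α : Type} (f : Nat → α) (d : α) {m i : Nat} (hi : i < m) :
    ((List.range m).map f).getD i d = f i := by
  rw [List.getD_eq_getElem _ _ (by simpa using hi)]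
  simp

-- last digit pushed by toDigitsCore is the units digit
theorem toDigitsCore_last (b : Nat) :
    ∀ (fuel n : Nat) (ds : List Char), 1 ≤ fuel →
    ∃ pre, Nat.toDigitsCore b fuel n ds = pre ++ Nat.digitChar (n % b) :: ds := by
  intro fuel
  induction fuel with
  | zero => intro n ds h; omega
  | succ k ih =>
    intro n ds _
    by_cases h : n / b = 0
    · exact ⟨[], by simp [Nat.toDigitsCore, h]⟩
    · cases k with
      | zero => exact ⟨[], by simp [Nat.toDigitsCore, h]⟩
      | succ k' =>
        obtain ⟨p2, hp2⟩ := ih (n / b) (Nat.digitChar (n % b) :: ds) (by omega)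
        have hstep : Nat.toDigitsCore b (k' + 1 + 1) n ds =
            Nat.toDigitsCore b (k' + 1) (n / b) (Nat.digitChar (n % b) :: ds) := by
          simp [Nat.toDigitsCore, h]
        exact ⟨p2 ++ [Nat.digitChar (n / b % b)], by rw [hstep, hp2]; simp⟩

theorem last_toStr_dvd (v : Int) (h : (10 : Int) ∣ v) :
    PySem.Str.pyGet? (PySem.Int.toStr v) (-1) = some '0' := by
  have hlast : (PySem.Int.toChars v).getLast? = some '0' := by
    unfold PySem.Int.toChars
    split
    · have hz : v.natAbs % 10 = 0 := by omega
      obtain ⟨pre, hp⟩ := toDigitsCore_last 10 (v.natAbs + 1) v.natAbs [] (by omega)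
      unfold Nat.toDigits
      rw [hp, hz]
      rw [show ('-' :: (pre ++ Nat.digitChar 0 :: [])) = (('-' :: pre) ++ [Nat.digitChar 0]) from rfl]
      rw [List.getLast?_concat]
      decide
    · have hz : v.toNat % 10 = 0 := by omega
      obtain ⟨pre, hp⟩ := toDigitsCore_last 10 (v.toNat + 1) v.toNat [] (by omega)
      unfold Nat.toDigits
      rw [hp, hz]
      rw [show (pre ++ Nat.digitChar 0 :: []) = (pre ++ [Nat.digitChar 0]) from rfl]
      rw [List.getLast?_concat]
      decide
  have hb : (PySem.Int.toStr v).toList = PySem.Int.toChars v := PySem.Int.toList_toStr v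
  simp [PySem.List.pyGet?_neg_one, hb, hlast]


theorem reach_getD (A : List (List Int)) (n k' : Int) (front : List Bool) {i : Nat}
    (hi : i < A.length) :
    (reachList A n k' front).getD i false =
      ((front.getD i false || (decide (0 < i) && front.getD (i - 1) false))
        && decide (0 ≤ k' - (i : Int) ∧ k' - (i : Int) < n)) := by
  unfold reachList
  exact getD_map_range' _ _ hi

theorem reach_mem (A : List (List Int)) (n k : Int) (before : List (Int × Int)) (front : List Bool)
    (hmem : ∀ i : Nat, i < A.length →
      ((front.getD i false) = true ↔ (((i : Int), k - (i : Int)) ∈ before)))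
    (hcov : ∀ p ∈ before, ∃ j : Nat, j < A.length ∧ p = ((j : Int), k - (j : Int)) ∧
      0 ≤ k - (j : Int) ∧ k - (j : Int) < n)
    {i : Nat} (hi : i < A.length) :
    ((reachList A n (k + 1) front).getD i false = true ↔
      (((i : Int), (k + 1) - (i : Int)) ∈ candList ((A.length : Int) - 1, n - 1) before)) := by
  rw [reach_getD A n (k + 1) front hi, mem_candList_iff]
  simp only [Bool.and_eq_true, Bool.or_eq_true, decide_eq_true_eq]
  constructor
  · rintro ⟨hpar, hb0, hb1⟩
    rcases hpar with hfi | ⟨hipos, hfi⟩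
    · -- right move from (i, k - i)
      have hp := (hmem i hi).1 hfi
      obtain ⟨j, hj, hpe, hpb0, hpb1⟩ := hcov _ hp
      have hij : (j : Int) = (i : Int) := by
        rw [Prod.mk.injEq] at hpe; omega
      refine ⟨((i : Int), k - (i : Int)), hp, Or.inr ⟨by omega, ?_⟩⟩
      rw [Prod.mk.injEq]
      constructor <;> omega
    · have hi' : i - 1 < A.length := by omega
      have hp := (hmem (i - 1) hi').1 hfi
      refine ⟨(((i - 1 : Nat) : Int), k - ((i - 1 : Nat) : Int)), hp, Or.inl ⟨by omega, ?_⟩⟩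
      rw [Prod.mk.injEq]
      constructor <;> omega
  · rintro ⟨p, hp, hco⟩
    obtain ⟨j, hj, rfl, hb0, hb1⟩ := hcov p hp
    rcases hco with ⟨hne, heq⟩ | ⟨hne, heq⟩
    · rw [Prod.mk.injEq] at heq
      obtain ⟨he1, he2⟩ := heq
      have hij : i = j + 1 := by omega
      refine ⟨Or.inr ⟨by omega, ?_⟩, by omega, by omega⟩
      have : i - 1 = j := by omega
      rw [this]
      exact (hmem j hj).2 hp
    · rw [Prod.mk.injEq] at heq
      obtain ⟨he1, he2⟩ := heq
      have hij : i = j := by omega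
      subst hij
      exact ⟨Or.inl ((hmem i hi).2 hp), by omega, by omega⟩

theorem cand_cover (A : List (List Int)) (n k : Int) (before : List (Int × Int))
    (hcov : ∀ p ∈ before, ∃ j : Nat, j < A.length ∧ p = ((j : Int), k - (j : Int)) ∧
      0 ≤ k - (j : Int) ∧ k - (j : Int) < n) :
    ∀ x ∈ candList ((A.length : Int) - 1, n - 1) before,
      ∃ i : Nat, i < A.length ∧ x = ((i : Int), (k + 1) - (i : Int)) ∧
        0 ≤ (k + 1) - (i : Int) ∧ (k + 1) - (i : Int) < n := by
  intro x hx
  rw [mem_candList_iff] at hx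
  obtain ⟨p, hp, hco⟩ := hx
  obtain ⟨j, hj, rfl, hb0, hb1⟩ := hcov p hp
  rcases hco with ⟨hne, rfl⟩ | ⟨hne, rfl⟩
  · exact ⟨j + 1, by omega, by rw [Prod.mk.injEq]; constructor <;> omega, by omega, by omega⟩
  · exact ⟨j, hj, by rw [Prod.mk.injEq]; constructor <;> omega, by omega, by omega⟩

theorem vals_mem (A : List (List Int)) (n k : Int) (before : List (Int × Int)) (front : List Bool)
    (hmem : ∀ i : Nat, i < A.length →
      ((front.getD i false) = true ↔ (((i : Int), k - (i : Int)) ∈ before)))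
    (hcov : ∀ p ∈ before, ∃ j : Nat, j < A.length ∧ p = ((j : Int), k - (j : Int)) ∧
      0 ≤ k - (j : Int) ∧ k - (j : Int) < n) :
    ∀ y, y ∈ valsB A n (k + 1) front ↔
      ∃ x ∈ candList ((A.length : Int) - 1, n - 1) before, y = cellP A x := by
  intro y
  unfold valsB
  constructor
  · intro hy
    obtain ⟨i, hif, hgy⟩ := List.mem_map.1 hy
    obtain ⟨hir, hr⟩ := List.mem_filter.1 hif
    have hi : i < A.length := List.mem_range.1 hir
    exact ⟨((i : Int), (k + 1) - (i : Int)),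
      (reach_mem A n k before front hmem hcov hi).1 hr, hgy.symm⟩
  · rintro ⟨x, hx, rfl⟩
    obtain ⟨i, hi, rfl, -, -⟩ := cand_cover A n k before hcov x hx
    exact List.mem_map.2 ⟨i, List.mem_filter.2
      ⟨List.mem_range.2 hi, (reach_mem A n k before front hmem hcov hi).2 hx⟩, rfl⟩

theorem bestV_eq (A : List (List Int)) (n k : Int) (before : List (Int × Int)) (front : List Bool)
    (hmem : ∀ i : Nat, i < A.length →
      ((front.getD i false) = true ↔ (((i : Int), k - (i : Int)) ∈ before)))
    (hcov : ∀ p ∈ before, ∃ j : Nat, j < A.length ∧ p = ((j : Int), k - (j : Int)) ∧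
      0 ≤ k - (j : Int) ∧ k - (j : Int) < n)
    (c : Int × Int) (C : List (Int × Int))
    (hC : candList ((A.length : Int) - 1, n - 1) before = c :: C) :
    bestV A n (k + 1) front = runMax A (cellP A c) C := by
  have hvm : ∀ y, y ∈ (c :: C).map (cellP A) ↔ y ∈ valsB A n (k + 1) front := by
    intro y
    constructor
    · intro hy
      rw [List.mem_map] at hy
      obtain ⟨x, hx, rfl⟩ := hy
      exact (vals_mem A n k before front hmem hcov _).2 ⟨x, by rw [hC]; exact hx, rfl⟩
    · intro hy
      obtain ⟨x, hx, rfl⟩ := (vals_mem A n k before front hmem hcov _).1 hy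
      rw [hC] at hx
      exact List.mem_map.2 ⟨x, hx, rfl⟩
  have hMmem : runMax A (cellP A c) C ∈ (c :: C).map (cellP A) := by
    rcases runMax_mem A (cellP A c) C with h | h
    · rw [h]; exact List.mem_map_of_mem (l := c :: C) (by exact List.mem_cons_self)
    · simp only [List.map_cons]; exact List.mem_cons_of_mem _ h
  have hMub : ∀ y ∈ (c :: C).map (cellP A), y ≤ runMax A (cellP A c) C := by
    intro y hy
    simp only [List.map_cons, List.mem_cons] at hy
    rcases hy with rfl | hy
    · exact (runMax_bounds A (cellP A c) C).1
    · rcases List.mem_map.1 hy with ⟨x, hx, rfl⟩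
      exact (runMax_bounds A (cellP A c) C).2 x hx
  unfold bestV
  cases hmx : PySem.List.max? (valsB A n (k + 1) front) (fun x => x) with
  | none =>
    rw [PySem.List.max?_eq_none_iff] at hmx
    have hcm : cellP A c ∈ valsB A n (k + 1) front := (hvm (cellP A c)).1 (by simp)
    rw [hmx] at hcm
    simp at hcm
  | some b =>
    exact (max_unique hvm hMmem hMub (PySem.List.max?_mem hmx) (PySem.List.max?_isMax hmx)).symm

theorem bestV_empty (A : List (List Int)) (n k : Int) (before : List (Int × Int))
    (front : List Bool)
    (hmem : ∀ i : Nat, i < A.length →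
      ((front.getD i false) = true ↔ (((i : Int), k - (i : Int)) ∈ before)))
    (hcov : ∀ p ∈ before, ∃ j : Nat, j < A.length ∧ p = ((j : Int), k - (j : Int)) ∧
      0 ≤ k - (j : Int) ∧ k - (j : Int) < n)
    (hC : candList ((A.length : Int) - 1, n - 1) before = []) :
    bestV A n (k + 1) front = 0 := by
  have hv : valsB A n (k + 1) front = [] := by
    rw [List.eq_nil_iff_forall_not_mem]
    intro y hy
    obtain ⟨x, hx, -⟩ := (vals_mem A n k before front hmem hcov y).1 hy
    rw [hC] at hx
    simp at hx
  unfold bestV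
  rw [hv]
  rfl

theorem frontNext_mem (A : List (List Int)) (n k : Int) (before : List (Int × Int))
    (front : List Bool)
    (hmem : ∀ i : Nat, i < A.length →
      ((front.getD i false) = true ↔ (((i : Int), k - (i : Int)) ∈ before)))
    (hcov : ∀ p ∈ before, ∃ j : Nat, j < A.length ∧ p = ((j : Int), k - (j : Int)) ∧
      0 ≤ k - (j : Int) ∧ k - (j : Int) < n)
    (V : Int) (hV : bestV A n (k + 1) front = V) {i : Nat} (hi : i < A.length) :
    ((frontNext A n (k + 1) front).getD i false = true ↔
      ((i : Int), (k + 1) - (i : Int)) ∈ (candList ((A.length : Int) - 1, n - 1) before).filter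
        (fun x => decide (cellP A x = V))) := by
  unfold frontNext
  rw [getD_map_range' _ _ hi, hV]
  simp only [Bool.and_eq_true, decide_eq_true_eq, List.mem_filter]
  constructor
  · rintro ⟨hr, hcell⟩
    exact ⟨(reach_mem A n k before front hmem hcov hi).1 hr, by simpa [cellP] using hcell⟩
  · rintro ⟨hx, hcell⟩
    exact ⟨(reach_mem A n k before front hmem hcov hi).2 hx, by simpa [cellP] using hcell⟩

theorem last_append_zero (number : String) :
    PySem.Str.pyGet? (number ++ PySem.Int.toStr 0) (-1) = some '0' := by
  have h : PySem.Int.toStr 0 = "0" := rfl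
  rw [h]
  simp [PySem.List.pyGet?_neg_one_append_singleton]

theorem loop_later (A : List (List Int)) (n : Int) :
    ∀ (fuel : Nat) (number : String) (k : Int) (before : List (Int × Int)) (front : List Bool),
    (∀ i : Nat, i < A.length →
      ((front.getD i false) = true ↔ (((i : Int), k - (i : Int)) ∈ before))) →
    (∀ p ∈ before, ∃ j : Nat, j < A.length ∧ p = ((j : Int), k - (j : Int)) ∧
      0 ≤ k - (j : Int) ∧ k - (j : Int) < n) →
    loopA A ((A.length : Int) - 1, n - 1) fuel number before [] 0 =
      loopB A n fuel number k front := by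
  intro fuel
  induction fuel with
  | zero => intro number k before front _ _; rfl
  | succ fuel ih =>
    intro number k before front hmem hcov
    by_cases hc : PySem.Str.pyGet? number (-1) = some '0'
    · rw [loopA_stop _ _ _ _ _ _ _ hc, loopB_stop _ _ _ _ _ _ hc]
    · rw [loopA_go _ _ _ _ _ _ _ hc, loopB_go _ _ _ _ _ _ hc, foldl_processPixel]
      cases hC : candList ((A.length : Int) - 1, n - 1) before with
      | nil =>
        simp only [List.foldl_nil]
        rw [bestV_empty A n k before front hmem hcov hC]
        apply ih
        · intro i hi
          rw [frontNext_mem A n k before front hmem hcov _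
            (bestV_empty A n k before front hmem hcov hC) hi, hC]
          simp
        · intro p hp
          simp at hp
      | cons c C =>
        rw [foldl_stepCand_empty]
        have hbv := bestV_eq A n k before front hmem hcov c C hC
        rw [hbv]
        apply ih
        · intro i hi
          rw [frontNext_mem A n k before front hmem hcov _ hbv hi, hC]
        · intro p hp
          rw [List.mem_filter] at hp
          exact cand_cover A n k before hcov p (by rw [hC]; exact hp.1)

theorem loop_first (A : List (List Int)) (hA : A ≠ [])
    (hn0 : 0 < (PySem.List.pyGetD A 0 ([] : List Int)).length)
    (hND : ¬ NegStart A) (fuel : Nat) :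
    loopA A ((A.length : Int) - 1, ((PySem.List.pyGetD A 0 ([] : List Int)).length : Int) - 1)
      fuel (PySem.Int.toStr (cellA A 0 0)) [(0, 0)] [(0, 0)] 0 =
    loopB A ((PySem.List.pyGetD A 0 ([] : List Int)).length : Int) fuel
      (PySem.Int.toStr (cellA A 0 0)) 0
      ((List.range A.length).map (fun i => decide (i = 0))) := by
  have hrow0 : PySem.List.pyGetD A 0 ([] : List Int) = A.headD [] := by
    rw [PySem.List.pyGetD_zero]; cases A <;> simp
  set n : Int := ((PySem.List.pyGetD A 0 ([] : List Int)).length : Int) with hn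
  set number : String := PySem.Int.toStr (cellA A 0 0) with hnum
  set front0 : List Bool := (List.range A.length).map (fun i => decide (i = 0)) with hfr
  cases fuel with
  | zero => rfl
  | succ fuel =>
    by_cases hc : PySem.Str.pyGet? number (-1) = some '0'
    · rw [loopA_stop _ _ _ _ _ _ _ hc, loopB_stop _ _ _ _ _ _ hc]
    · have hmlen : 0 < A.length := List.length_pos_iff.2 hA
      have hnI : (1 : Int) ≤ n := by rw [hn]; exact_mod_cast hn0
      have hmem0 : ∀ i : Nat, i < A.length →
          ((front0.getD i false) = true ↔
            (((i : Int), (0 : Int) - (i : Int)) ∈ ([((0 : Int), (0 : Int))] : List (Int × Int)))) := by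
        intro i hi
        rw [hfr, getD_map_range' _ _ hi]
        simp only [decide_eq_true_eq, List.mem_singleton, Prod.mk.injEq]
        constructor
        · rintro rfl; constructor <;> simp
        · rintro ⟨h1, -⟩; exact_mod_cast h1
      have hcov0 : ∀ p ∈ ([((0 : Int), (0 : Int))] : List (Int × Int)),
          ∃ j : Nat, j < A.length ∧ p = ((j : Int), (0 : Int) - (j : Int)) ∧
            0 ≤ (0 : Int) - (j : Int) ∧ (0 : Int) - (j : Int) < n := by
        intro p hp
        rw [List.mem_singleton] at hp
        subst hp
        exact ⟨0, hmlen, by simp, by simp, by simp; omega⟩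
      rw [loopA_go _ _ _ _ _ _ _ hc, loopB_go _ _ _ _ _ _ hc, foldl_processPixel]
      cases hC : candList ((A.length : Int) - 1, n - 1) ([((0 : Int), (0 : Int))]) with
      | nil =>
        simp only [List.foldl_nil]
        rw [bestV_empty A n 0 _ front0 hmem0 hcov0 hC]
        rw [loopA_stop _ _ _ _ _ _ _ (last_append_zero number),
          loopB_stop _ _ _ _ _ _ (last_append_zero number)]
      | cons c C =>
        rw [foldl_stepCand_spec A (c :: C) [((0 : Int), (0 : Int))] 0 (by simp)]
        have hbv := bestV_eq A n 0 _ front0 hmem0 hcov0 c C hC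
        set M := runMax A (cellP A c) C with hM
        -- the start value does not end in the digit 0 (else the loop would have stopped)
        have hcell00 : cellA A 0 0 = (A.headD []).headD 0 := by
          unfold cellA
          rw [PySem.List.pyGetD_zero, PySem.List.pyGetD_zero]
          cases A with
          | nil => simp
          | cons r t => cases r <;> simp
        have hd1 : (A.headD []).headD 0 % 10 ≠ 0 := by
          intro h0
          apply hc
          rw [hnum, hcell00]
          exact last_toStr_dvd _ (by omega)
        have hX : ¬ ((A.length = 1 ∧ 2 ≤ (A.headD []).length ∧ (A.headD []).getD 1 0 < 0) ∨
            (2 ≤ A.length ∧ (A.headD []).length = 1 ∧ (A.getD 1 []).getD 0 0 < 0) ∨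
            (2 ≤ A.length ∧ 2 ≤ (A.headD []).length ∧
              (A.getD 1 []).getD 0 0 < 0 ∧ (A.headD []).getD 1 0 < 0)) :=
          fun hx => hND (by unfold NegStart; exact ⟨hd1, hx⟩)
        have hgetn : ((A.headD []).length : Int) = n := by rw [hn, hrow0]
        have hcell01' : cellP A ((0 : Int), (1 : Int)) = (A.headD []).getD 1 0 := by
          show cellA A 0 1 = _
          unfold cellA
          rw [PySem.List.pyGetD_zero, PySem.List.pyGetD_ofNat']
          cases A <;> simp
        have hcell10' : cellP A ((1 : Int), (0 : Int)) = (A.getD 1 []).getD 0 0 := by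
          show cellA A 1 0 = _
          unfold cellA
          rw [show PySem.List.pyGetD A 1 ([] : List Int) = A.getD 1 [] from
            PySem.List.pyGetD_ofNat' A 1 [], PySem.List.pyGetD_zero]
        have hC0 : candList ((A.length : Int) - 1, n - 1) [((0 : Int), (0 : Int))] =
            (if (0 : Int) = (A.length : Int) - 1 then [] else [((1 : Int), (0 : Int))]) ++
            (if (0 : Int) = n - 1 then [] else [((0 : Int), (1 : Int))]) := by
          simp only [candList, List.flatMap_cons, List.flatMap_nil, List.append_nil,
            retrive_B, retrive_R]
          split_ifs <;> simp
        have hex : ∃ x ∈ candList ((A.length : Int) - 1, n - 1) [((0 : Int), (0 : Int))],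
            0 ≤ cellP A x := by
          by_cases hm1 : A.length = 1 <;> by_cases hn1 : n = 1
          · exfalso
            rw [hC0, if_pos (by omega), if_pos (by omega)] at hC
            simp at hC
          · have h2n : 2 ≤ (A.headD []).length := by omega
            have hnneg : ¬ ((A.headD []).getD 1 0 < 0) := by
              intro hneg
              exact hX (Or.inl ⟨hm1, h2n, hneg⟩)
            refine ⟨((0 : Int), (1 : Int)), ?_, by omega⟩
            rw [hC0, if_pos (by omega), if_neg (by omega)]
            simp
          · have h2m : 2 ≤ A.length := by omega
            have hnneg : ¬ ((A.getD 1 []).getD 0 0 < 0) := by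
              intro hneg
              exact hX (Or.inr (Or.inl ⟨h2m, by omega, hneg⟩))
            refine ⟨((1 : Int), (0 : Int)), ?_, by omega⟩
            rw [hC0, if_neg (by omega), if_pos (by omega)]
            simp
          · have h2m : 2 ≤ A.length := by omega
            have h2n : 2 ≤ (A.headD []).length := by omega
            have hnneg : ¬ ((A.getD 1 []).getD 0 0 < 0 ∧ (A.headD []).getD 1 0 < 0) := by
              intro hneg
              exact hX (Or.inr (Or.inr ⟨h2m, h2n, hneg.1, hneg.2⟩))
            by_cases hq : 0 ≤ (A.getD 1 []).getD 0 0
            · refine ⟨((1 : Int), (0 : Int)), ?_, by omega⟩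
              rw [hC0, if_neg (by omega), if_neg (by omega)]
              simp
            · refine ⟨((0 : Int), (1 : Int)), ?_, by omega⟩
              rw [hC0, if_neg (by omega), if_neg (by omega)]
              simp
        obtain ⟨x, hxmem, hx0⟩ := hex
        rw [hC] at hxmem
        have hub : ∀ z ∈ c :: C, cellP A z ≤ M := by
          intro z hz
          rcases List.mem_cons.1 hz with h | hz
          · rw [h]; exact (runMax_bounds A (cellP A c) C).1
          · exact (runMax_bounds A (cellP A c) C).2 z hz
        have hM0 : 0 ≤ M := le_trans hx0 (hub x hxmem)
        have hrm : runMax A 0 (c :: C) = M := by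
          have h1 : runMax A 0 (c :: C) = runMax A (max 0 (cellP A c)) C := by
            simp [runMax]
          rw [h1, runMax_seed_max, hM]
          exact max_eq_right hM0
        rw [hrm, hbv]
        by_cases hz : PySem.Str.pyGet? (number ++ PySem.Int.toStr M) (-1) = some '0'
        · rw [loopA_stop _ _ _ _ _ _ _ hz, loopB_stop _ _ _ _ _ _ hz]
        · have hMpos : 0 < M := by
            rcases lt_or_eq_of_le hM0 with h | h
            · exact h
            · exact absurd (by rw [← h]; exact last_append_zero number) hz
          rw [if_pos hMpos]
          apply loop_later A n fuel _ (0 + 1) _ _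
          · intro i hi
            rw [frontNext_mem A n 0 _ front0 hmem0 hcov0 M hbv hi, hC]
          · intro p hp
            rw [List.mem_filter] at hp
            exact cand_cover A n 0 _ hcov0 p (by rw [hC]; exact hp.1)

-- ===== VERDICT (by name: the statement is the Claim_ definition above) =====
theorem solution_spec : Claim_equal_solution := by
  unfold Claim_equal_solution
  intro A _ hPre
  unfold Spec_solution
  obtain ⟨h1, h2, -, hND⟩ := hPre
  have hn0 : 0 < (PySem.List.pyGetD A 0 ([] : List Int)).length := by
    have hrow0 : PySem.List.pyGetD A 0 ([] : List Int) = A.headD [] := by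
      rw [PySem.List.pyGetD_zero]; cases A <;> simp
    rw [hrow0]
    exact h2
  show PySem.Str.slice
      (loopA A ((A.length : Int) - 1, ((PySem.List.pyGetD A 0 ([] : List Int)).length : Int) - 1)
        (A.length + (PySem.List.pyGetD A 0 ([] : List Int)).length + 2)
        (PySem.Int.toStr (cellA A 0 0)) [(0, 0)] [(0, 0)] 0) none (some (-1)) =
    PySem.Str.slice
      (loopB A ((PySem.List.pyGetD A 0 ([] : List Int)).length : Int)
        (A.length + (PySem.List.pyGetD A 0 ([] : List Int)).length + 2)
        (PySem.Int.toStr (cellA A 0 0)) 0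
        ((List.range A.length).map (fun i => decide (i = 0)))) none (some (-1))
  rw [loop_first A h1 hn0 hND]
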